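-- pv_equiv track=rewrite | github.com/haminthecoder/leetcode_solution | easy/makeBinary.py | solution
-- ===== SOURCE A (Python) =====
-- def solution(A, B):
--     # write your code in Python 3.6
--     res = A * B
--     binary = format(res, 'b')
--     count = 0
--     for i in range(len(binary)):
--         if binary[i] == "1":
--             count += 1
--
--     return count
-- ===== SOURCE B (Python) =====
-- def solution(A, B):
--     n = abs(A * B)
--     count = 0
--     while n:
--         count += n & 1
--         n >>= 1
--     return count
-- ===== Notes on version B (the rewrite author's own statement) =====
-- stated objective: idiomatic
-- what changed: B counts set bits of abs(A*B) by a shift-and-mask arithmetic loop instead of formatting the product as a binary string and scanning its characters.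
import Mathlib
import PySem

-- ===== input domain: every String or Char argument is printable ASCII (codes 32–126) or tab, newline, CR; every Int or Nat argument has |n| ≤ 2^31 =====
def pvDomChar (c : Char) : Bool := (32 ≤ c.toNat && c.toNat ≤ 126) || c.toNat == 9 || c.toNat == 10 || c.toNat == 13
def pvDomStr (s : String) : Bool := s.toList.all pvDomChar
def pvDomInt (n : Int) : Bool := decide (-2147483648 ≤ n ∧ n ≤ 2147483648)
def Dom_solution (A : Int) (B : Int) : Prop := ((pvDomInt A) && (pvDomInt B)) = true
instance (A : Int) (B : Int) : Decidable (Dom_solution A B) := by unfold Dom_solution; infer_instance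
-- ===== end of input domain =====

-- B replaces A's binary-string formatting and character scan with an arithmetic shift-and-mask bit-count loop over abs(A*B); same value everywhere.
-- ===== PORT A =====
-- binary digits of a natural number, most significant first (empty for 0); format(res,'b') is '0' for 0, else optional '-' ++ digits
def binDigits (n : Nat) : List Char :=
  if h : n = 0 then []
  else binDigits (n / 2) ++ [if n % 2 = 1 then '1' else '0']
decreasing_by exact Nat.div_lt_self (Nat.pos_of_ne_zero h) (by omega)

def formatBin (res : Int) : List Char :=
  if res = 0 then ['0']
  else (if res < 0 then ['-'] else []) ++ binDigits res.natAbs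

def solution (A : Int) (B : Int) : Int :=
  let res := A * B
  let binary := formatBin res
  binary.foldl (fun count c => if c = '1' then count + 1 else count) (0 : Int)

-- ===== PORT B =====
-- the while-loop of Source B: count += n & 1; n >>= 1
def popLoop (n : Nat) (count : Int) : Int :=
  if h : n = 0 then count
  else popLoop (n / 2) (count + (n % 2 : Nat))
decreasing_by exact Nat.div_lt_self (Nat.pos_of_ne_zero h) (by omega)

def solution_alt (A : Int) (B : Int) : Int :=
  popLoop (A * B).natAbs 0

-- ===== PRECONDITION & SPEC =====
def Spec_solution (A : Int) (B : Int) (out : Int) : Prop := out = solution_alt A B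
instance (A : Int) (B : Int) (out : Int) : Decidable (Spec_solution A B out) := by unfold Spec_solution; infer_instance

-- ===== CLAIM (what is proved, stated in full; the proofs are below) =====
def Claim_equal_solution : Prop := ∀ (A : Int) (B : Int), Dom_solution A B → Spec_solution A B (solution A B)

-- ===== LEMMAS AND PROOFS =====

lemma foldl_count (l : List Char) (c : Int) :
    l.foldl (fun count ch => if ch = '1' then count + 1 else count) c
      = c + (l.count '1' : Nat) := by
  induction l generalizing c with
  | nil => simp
  | cons a l ih =>
    simp only [List.foldl_cons, ih, List.count_cons]
    by_cases h : a = '1' <;> simp [h] <;> push_cast <;> ring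

lemma popLoop_add (n : Nat) (c : Int) : popLoop n c = c + popLoop n 0 := by
  induction n using Nat.strong_induction_on generalizing c with
  | _ n ih =>
    by_cases h : n = 0
    · simp [h, popLoop]
    · have hd := Nat.div_lt_self (Nat.pos_of_ne_zero h) (by omega : 1 < 2)
      conv_lhs => rw [popLoop]
      conv_rhs => rw [popLoop]
      simp only [h, dite_false]
      rw [ih _ hd, ih _ hd ((0:Int) + _)]
      ring

lemma binDigits_count (n : Nat) :
    ((binDigits n).count '1' : Int) = popLoop n 0 := by
  induction n using Nat.strong_induction_on with
  | _ n ih =>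
    rw [binDigits, popLoop]
    by_cases h : n = 0
    · simp [h]
    · simp only [h, dite_false, List.count_append]
      rw [popLoop_add]
      have := ih (n / 2) (Nat.div_lt_self (Nat.pos_of_ne_zero h) (by omega))
      by_cases h2 : n % 2 = 1 <;> simp [h2] <;> push_cast at this ⊢ <;> omega

-- ===== VERDICT (by name: the statement is the Claim_ definition above) =====
theorem solution_spec : Claim_equal_solution := by
  intro A B _
  unfold Spec_solution solution solution_alt formatBin
  rw [foldl_count]
  by_cases h : A * B = 0
  · simp [h, popLoop, binDigits]
  · simp only [h, if_false]
    by_cases hn : A * B < 0 <;>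
      simp [hn, List.count_append, binDigits_count]
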